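-- pv_equiv track=rewrite | github.com/ketanpurohit0/python | elements_of_python_programming/StockSpan.py | solution
-- ===== SOURCE A (Python) =====
-- from typing import List
--
-- def solution(arr: List[int]) -> None:
--     span = []
--
--     for index in range(len(arr)):
--         if index == 0:
--             span.append(1)
--         else:
--             if arr[index] < arr[index - 1]:
--                 span.append(1)
--             else:
--                 thespan = 1 + span[index - 1]
--                 span.append(thespan)
--
--     return span
-- ===== SOURCE B (Python) =====
-- from typing import List
--
-- def solution(arr: List[int]) -> List[int]:
--     # Two-phase, run-based: walk the array run by run; for each maximal
--     # non-decreasing run [i, j) emit the whole block 1, 2, ..., j - i at once.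
--     out = []
--     i, n = 0, len(arr)
--     while i < n:
--         j = i + 1
--         while j < n and arr[j] >= arr[j - 1]:
--             j += 1
--         out.extend(range(1, j - i + 1))
--         i = j
--     return out
-- ===== Notes on version B (the rewrite author's own statement) =====
-- stated objective: alternative
-- what changed: Replaces the per-element 'previous span + 1' recurrence (which reads back into the output list) with a two-phase run-based scan: find the end of each maximal non-decreasing run, then emit the whole block 1..runlen at once; the output list is never read.
import Mathlib
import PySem

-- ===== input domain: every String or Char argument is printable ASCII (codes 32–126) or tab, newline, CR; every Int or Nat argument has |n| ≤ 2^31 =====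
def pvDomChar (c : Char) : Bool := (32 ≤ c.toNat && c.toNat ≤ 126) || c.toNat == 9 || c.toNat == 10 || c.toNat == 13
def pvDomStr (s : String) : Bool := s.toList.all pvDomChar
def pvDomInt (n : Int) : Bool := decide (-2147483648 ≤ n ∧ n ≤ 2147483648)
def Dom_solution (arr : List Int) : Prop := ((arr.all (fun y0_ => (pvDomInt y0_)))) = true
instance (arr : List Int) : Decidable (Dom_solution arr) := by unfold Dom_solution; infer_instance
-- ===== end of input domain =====

-- B replaces A's per-element 'previous span + 1' recurrence with a two-phase
-- run-based scan (find each maximal non-decreasing run, then emit 1..runlen);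
-- same O(n) cost, different structure (objective: alternative).

-- ===== PORT A =====
-- literal transliteration of A's index loop; all list indices are in range,
-- so Python's arr[index] / span[index-1] are rendered with getD.
def solution (arr : List Int) : List Int :=
  (List.range arr.length).foldl
    (fun span index =>
      if index = 0 then span ++ [1]
      else if arr.getD index 0 < arr.getD (index - 1) 0 then span ++ [1]
      else span ++ [1 + span.getD (index - 1) 0])
    []

-- ===== PORT B =====
-- inner while loop of Source B: length of the maximal non-decreasing run
-- continuing after `prev`, together with the remaining suffix (= index j).
def takeRun (prev : Int) : List Int → Nat × List Int
  | [] => (0, [])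
  | x :: xs =>
      if x < prev then (0, x :: xs)
      else
        let r := takeRun x xs
        (r.1 + 1, r.2)

lemma takeRun_snd_length_le (prev : Int) (xs : List Int) :
    (takeRun prev xs).2.length ≤ xs.length := by
  induction xs generalizing prev with
  | nil => simp [takeRun]
  | cons x xs ih =>
      simp only [takeRun]
      split
      · simp
      · exact Nat.le_succ_of_le (ih x)

-- outer while loop of Source B: one recursive step per run; `out.extend(range(1, k+1))`
-- is the map over List.range.
def solution_alt : List Int → List Int
  | [] => []
  | x :: xs =>
      let r := takeRun x xs
      ((List.range (r.1 + 1)).map (fun i : Nat => (i : Int) + 1)) ++ solution_alt r.2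
termination_by l => l.length
decreasing_by
  exact Nat.lt_succ_of_le (takeRun_snd_length_le x xs)

-- ===== PRECONDITION & SPEC =====
def Spec_solution (arr : List Int) (out : List Int) : Prop := out = solution_alt arr
instance (arr : List Int) (out : List Int) : Decidable (Spec_solution arr out) := by unfold Spec_solution; infer_instance

-- ===== CLAIM (what is proved, stated in full; the proofs are below) =====
def Claim_equal_solution : Prop := ∀ (arr : List Int), Dom_solution arr → Spec_solution arr (solution arr)

-- ===== LEMMAS AND PROOFS =====

-- Common specification: front-recursion carrying the previous element and the
-- current running count.
def goSpec (prev c : Int) : List Int → List Int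
  | [] => []
  | x :: xs => if x < prev then 1 :: goSpec x 1 xs else (c + 1) :: goSpec x (c + 1) xs

def spec : List Int → List Int
  | [] => []
  | x :: xs => 1 :: goSpec x 1 xs

lemma spec_length (l : List Int) : (spec l).length = l.length := by
  have go : ∀ (l : List Int) (prev c : Int), (goSpec prev c l).length = l.length := by
    intro l
    induction l with
    | nil => intro prev c; simp [goSpec]
    | cons x xs ih => intro prev c; simp only [goSpec]; split <;> simp [ih]
  cases l with
  | nil => rfl
  | cons x xs => simp [spec, go]

-- ---------- B = spec ----------

lemma goSpec_run (xs : List Int) (prev c : Int) :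
    goSpec prev c xs =
      (List.range (takeRun prev xs).1).map (fun i : Nat => c + 1 + (i : Int)) ++ spec (takeRun prev xs).2 := by
  induction xs generalizing prev c with
  | nil => simp [goSpec, takeRun, spec]
  | cons x xs ih =>
      by_cases h : x < prev
      · simp [goSpec, takeRun, h, spec]
      · simp only [goSpec, takeRun, h, if_false]
        rw [ih x (c + 1), List.range_succ_eq_map, List.map_cons, List.map_map]
        simp only [List.cons_append, Nat.cast_zero]
        congr 1
        · ring
        · congr 1
          apply List.map_congr_left
          intro i _
          simp [Function.comp]
          ring

lemma alt_eq_spec (l : List Int) : solution_alt l = spec l := by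
  induction l using solution_alt.induct with
  | case1 => rw [solution_alt]; rfl
  | case2 x xs r ih =>
      rw [solution_alt]
      rw [ih, spec, goSpec_run xs x 1, List.range_succ_eq_map, List.map_cons, List.map_map]
      simp only [List.cons_append, Nat.cast_zero, zero_add]
      congr 2
      apply List.map_congr_left
      intro i _
      simp [Function.comp]
      ring

-- ---------- A = spec ----------

lemma goSpec_snoc (ys : List Int) (prev c a : Int) :
    goSpec prev c (ys ++ [a]) =
      goSpec prev c ys ++
        [if a < ys.getLastD prev then 1 else (goSpec prev c ys).getLastD c + 1] := by
  induction ys generalizing prev c with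
  | nil => simp only [List.nil_append, goSpec, List.getLastD_nil]; split <;> rfl
  | cons y ys ih =>
      by_cases h : y < prev
      · simp only [List.cons_append, goSpec, h, if_true, ih y 1, List.getLastD_cons]
      · simp only [List.cons_append, goSpec, h, if_false, ih y (c + 1), List.getLastD_cons]

lemma spec_snoc (x : Int) (ys : List Int) (a : Int) :
    spec ((x :: ys) ++ [a]) =
      spec (x :: ys) ++
        [if a < (x :: ys).getLastD 0 then 1 else (spec (x :: ys)).getLastD 0 + 1] := by
  simp only [List.cons_append, spec, goSpec_snoc, List.getLastD_cons]

-- getLastD as a positional read (both sides of A's span[index-1] rewrite through this)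
lemma getLastD_eq_getD (l : List Int) (d : Int) :
    l.getLastD d = l.getD (l.length - 1) d := by
  rw [List.getLastD_eq_getLast?, List.getLast?_eq_getElem?, List.getD_eq_getElem?_getD]

lemma A_loop (arr : List Int) (n : Nat) (hn : n ≤ arr.length) :
    (List.range n).foldl
      (fun span index =>
        if index = 0 then span ++ [1]
        else if arr.getD index 0 < arr.getD (index - 1) 0 then span ++ [1]
        else span ++ [1 + span.getD (index - 1) 0])
      [] = spec (arr.take n) := by
  induction n with
  | zero => simp [spec]
  | succ n ih =>
      have hn' : n < arr.length := hn
      have htake : arr.take (n + 1) = arr.take n ++ [arr[n]] := by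
        rw [List.take_add_one]; simp [List.getElem?_eq_getElem hn']
      rw [List.range_succ, List.foldl_append, ih (Nat.le_of_lt hn'), htake]
      simp only [List.foldl_cons, List.foldl_nil]
      by_cases h0 : n = 0
      · subst h0
        simp [spec, goSpec]
      · -- n ≥ 1 : the take-n prefix is nonempty
        have harr : arr ≠ [] := by
          intro h; rw [h] at hn'; simp at hn'
        obtain ⟨x, ys, hxy⟩ := List.exists_cons_of_ne_nil
          (show arr.take n ≠ [] by
            simp only [ne_eq, List.take_eq_nil_iff, not_or]
            exact ⟨h0, harr⟩)
        have hlen : (spec (arr.take n)).length = n := by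
          rw [spec_length, List.length_take]; omega
        have h1 : arr.getD n 0 = arr[n] := List.getD_eq_getElem arr 0 hn'
        have h2 : (arr.take n).getLastD 0 = arr.getD (n - 1) 0 := by
          rw [getLastD_eq_getD, List.length_take]
          have : min n arr.length - 1 = n - 1 := by omega
          rw [this, List.getD_eq_getElem?_getD, List.getD_eq_getElem?_getD,
            List.getElem?_take_of_lt (by omega : n - 1 < n)]
        have h3 : (spec (arr.take n)).getD (n - 1) 0 = (spec (arr.take n)).getLastD 0 := by
          rw [getLastD_eq_getD, hlen]
        rw [hxy, spec_snoc, ← hxy, h1, ← h2, h3]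
        simp only [if_neg h0]
        split_ifs with hc
        · rfl
        · rw [add_comm]

theorem solution_spec : Claim_equal_solution := by
  intro arr _
  unfold Spec_solution
  rw [alt_eq_spec, solution, A_loop arr arr.length le_rfl, List.take_length]
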